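-- pv_equiv track=rewrite | github.com/abhinavkochar9/Temporal_diff | app.py | _best_match_from_list
-- ===== SOURCE A (Python) =====
-- def _norm_name(s: str) -> str:
--     return "".join(ch for ch in str(s).lower() if ch.isalnum())
--
-- def _best_match_from_list(options: list[str], target: str | None) -> str | None:
--     """Return best match from options for target using alnum-only, case-insensitive matching.
--     Prefers exact normalized match, then contains, then reverse-contains.
--     """
--     if not target or not options:
--         return None
--     want = _norm_name(target)
--     # exact normalized match
--     for o in options:
--         if _norm_name(o) == want:
--             return o
--     # contains: option contains target
--     for o in options:
--         if want and _norm_name(o).find(want) != -1: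
--             return o
--     # reverse contains: target contains option
--     for o in options:
--         if want and want.find(_norm_name(o)) != -1:
--             return o
--     return None
-- ===== SOURCE B (Python) =====
-- def _norm_name(s: str) -> str:
--     return "".join(ch for ch in str(s).lower() if ch.isalnum())
--
-- def _best_match_from_list(options, target):
--     if not target or not options:
--         return None
--     want = _norm_name(target)
--     first_exact = None
--     first_contains = None
--     first_reverse = None
--     for o in options:
--         n = _norm_name(o)
--         if first_exact is None and n == want:
--             first_exact = o
--         if want and first_contains is None and n.find(want) != -1:
--             first_contains = o
--         if want and first_reverse is None and want.find(n) != -1: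
--             first_reverse = o
--     if first_exact is not None:
--         return first_exact
--     if first_contains is not None:
--         return first_contains
--     return first_reverse
-- ===== Notes on version B (the rewrite author's own statement) =====
-- stated objective: alternative
-- what changed: Replaced A's three sequential scans (each re-normalizing every option) by one pass that normalizes each option once and keeps the first candidate per tier (exact/contains/reverse), choosing among them at the end.
import Mathlib
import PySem

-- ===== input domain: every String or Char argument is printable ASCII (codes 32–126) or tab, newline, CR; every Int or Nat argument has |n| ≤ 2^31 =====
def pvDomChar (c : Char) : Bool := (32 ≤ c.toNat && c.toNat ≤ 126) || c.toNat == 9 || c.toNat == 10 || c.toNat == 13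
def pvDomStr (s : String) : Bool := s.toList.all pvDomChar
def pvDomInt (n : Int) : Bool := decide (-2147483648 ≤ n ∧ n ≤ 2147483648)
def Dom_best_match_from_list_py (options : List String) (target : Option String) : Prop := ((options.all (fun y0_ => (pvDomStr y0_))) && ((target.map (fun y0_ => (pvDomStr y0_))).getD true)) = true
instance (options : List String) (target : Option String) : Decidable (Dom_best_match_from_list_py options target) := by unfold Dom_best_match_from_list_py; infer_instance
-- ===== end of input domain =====

-- B fuses A's three scans into one pass that normalizes each option once and keeps the first hit per tier.

-- ===== PORT A =====

-- _norm_name(s): lowercase, keep alnum chars only (join of a filtered generator)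
def pvNorm (s : String) : String :=
  String.ofList (((PySem.Str.lower s).toList).filter (fun ch => PySem.Chars.isalnum ch))

-- first loop of A: exact normalized match
def pvFindExact (want : String) : List String → Option String
  | [] => none
  | o :: rest => if pvNorm o = want then some o else pvFindExact want rest

-- second loop of A: option contains target
def pvFindContains (want : String) : List String → Option String
  | [] => none
  | o :: rest =>
      if want ≠ "" ∧ PySem.Str.find (pvNorm o) want ≠ -1 then some o
      else pvFindContains want rest

-- third loop of A: target contains option
def pvFindReverse (want : String) : List String → Option String
  | [] => none
  | o :: rest =>
      if want ≠ "" ∧ PySem.Str.find want (pvNorm o) ≠ -1 then some o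
      else pvFindReverse want rest

def best_match_from_list_py (options : List String) (target : Option String) : Option String :=
  match target with
  | none => none
  | some t =>
    if t = "" ∨ options = [] then none
    else
      let want := pvNorm t
      match pvFindExact want options with
      | some o => some o
      | none =>
        match pvFindContains want options with
        | some o => some o
        | none => pvFindReverse want options

-- ===== PORT B =====

-- one step of B's single pass: normalize once, update the three first-hit candidates
def pvStep (want : String) (st : Option String × Option String × Option String) (o : String) :
    Option String × Option String × Option String :=
  let n := pvNorm o
  let e := if st.1 = none ∧ n = want then some o else st.1
  let c := if want ≠ "" ∧ st.2.1 = none ∧ PySem.Str.find n want ≠ -1 then some o else st.2.1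
  let r := if want ≠ "" ∧ st.2.2 = none ∧ PySem.Str.find want n ≠ -1 then some o else st.2.2
  (e, c, r)

def best_match_from_list_py_alt (options : List String) (target : Option String) : Option String :=
  match target with
  | none => none
  | some t =>
    if t = "" ∨ options = [] then none
    else
      let want := pvNorm t
      let st := options.foldl (pvStep want) (none, none, none)
      match st.1 with
      | some e => some e
      | none =>
        match st.2.1 with
        | some c => some c
        | none => st.2.2

-- ===== PRECONDITION & SPEC =====
def Spec_best_match_from_list_py (options : List String) (target : Option String) (out : Option String) : Prop := out = best_match_from_list_py_alt options target
instance (options : List String) (target : Option String) (out : Option String) : Decidable (Spec_best_match_from_list_py options target out) := by unfold Spec_best_match_from_list_py; infer_instance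

-- ===== CLAIM (what is proved, stated in full; the proofs are below) =====
def Claim_equal_best_match_from_list_py : Prop := ∀ (options : List String) (target : Option String), Dom_best_match_from_list_py options target → Spec_best_match_from_list_py options target (best_match_from_list_py options target)

-- ===== LEMMAS AND PROOFS =====

-- the single pass computes, componentwise, the first hit of each of A's three loops
theorem pvStep_foldl (want : String) (os : List String)
    (e c r : Option String) :
    os.foldl (pvStep want) (e, c, r) =
      (e.rec (pvFindExact want os) (fun x => some x),
       c.rec (pvFindContains want os) (fun x => some x),
       r.rec (pvFindReverse want os) (fun x => some x)) := by
  induction os generalizing e c r with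
  | nil => cases e <;> cases c <;> cases r <;> rfl
  | cons o rest ih =>
    simp only [List.foldl_cons, pvStep]
    rw [ih]
    cases e <;> cases c <;> cases r <;>
      simp_all [pvFindExact, pvFindContains, pvFindReverse] <;>
      split_ifs <;> simp_all

-- ===== VERDICT (by name: the statement is the Claim_ definition above) =====
theorem best_match_from_list_py_spec : Claim_equal_best_match_from_list_py := by
  intro options target _
  unfold Spec_best_match_from_list_py best_match_from_list_py best_match_from_list_py_alt
  cases target with
  | none => rfl
  | some t =>
    by_cases h : t = "" ∨ options = []
    · simp [h]
    · simp only [h, if_false]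
      rw [pvStep_foldl]
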